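-- pv_equiv track=rewrite | github.com/dnxnf/Meachine-Learning-New | Leetcodes/leetcode/editor/cn/[LCS 01]下载插件.py | leastMinutes
-- ===== SOURCE A (Python) =====
-- def leastMinutes(n: int) -> int:
--     if n == 1:
--         return 1
--     if n == 2:
--         return 2
--     if n == 3:
--         return 3
--     if n == 4:
--         return 3
--     # 动态规划,后面的由前面决定，如果前面能下载i个，那么后面就能下载2i个
--     dp = [0] * (n + 1)
--     dp[1] = 1
--     dp[2] = 2
--     dp[3] = 3
--     dp[4] = 3
--     # 如果
--     for i in range(5, n + 1):
--         dp[i] = min(dp[i - 1] + 1, dp[(i + 1) // 2] + 1)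
--     return dp[n]
-- ===== SOURCE B (Python) =====
-- def leastMinutes(n: int) -> int:
--     # min minutes = 1 + ceil(log2(n)) = (n-1).bit_length() + 1 for n >= 1
--     return (n - 1).bit_length() + 1
-- ===== Notes on version B (the rewrite author's own statement) =====
-- stated objective: faster
-- what changed: Replaces the O(n) dynamic-programming table with the closed form (n-1).bit_length()+1 (= ceil(log2 n)+1).
import Mathlib
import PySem

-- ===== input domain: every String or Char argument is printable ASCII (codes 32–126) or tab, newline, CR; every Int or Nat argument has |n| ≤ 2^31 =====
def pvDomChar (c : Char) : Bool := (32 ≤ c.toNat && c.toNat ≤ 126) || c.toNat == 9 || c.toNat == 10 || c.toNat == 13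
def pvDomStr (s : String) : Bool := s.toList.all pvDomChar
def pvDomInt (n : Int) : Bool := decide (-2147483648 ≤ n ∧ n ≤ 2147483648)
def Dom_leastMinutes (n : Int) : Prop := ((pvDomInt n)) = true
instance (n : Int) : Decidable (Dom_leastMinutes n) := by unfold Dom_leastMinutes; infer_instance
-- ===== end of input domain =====

-- B replaces A's O(n) dynamic-programming table by the closed form (n-1).bit_length()+1; faster (asymptotic).


-- ===== PORT A =====
-- dp[1..4] initialised, then dp[i] = min(dp[i-1]+1, dp[(i+1)//2]+1)
def lmInit (n : Int) : List Int :=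
  PySem.List.pySetD (PySem.List.pySetD (PySem.List.pySetD (PySem.List.pySetD
    (List.replicate (n + 1).toNat 0) 1 1) 2 2) 3 3) 4 3

def lmStep (dp : List Int) (i : Int) : List Int :=
  PySem.List.pySetD dp i
    (min (PySem.List.pyGetD dp (i - 1) 0 + 1)
         (PySem.List.pyGetD dp (PySem.Int.floordiv (i + 1) 2) 0 + 1))

def leastMinutes (n : Int) : Int :=
  if n = 1 then 1
  else if n = 2 then 2
  else if n = 3 then 3
  else if n = 4 then 3
  else
    PySem.List.pyGetD ((PySem.List.pyRange 5 (n + 1) 1).foldl lmStep (lmInit n)) n 0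

-- ===== PORT B =====
def leastMinutes_alt (n : Int) : Int := (PySem.Int.bitLength (n - 1) : Int) + 1

-- ===== PRECONDITION & SPEC =====
-- A raises IndexError for n ≤ 0 (dp[1] = 1 on a too-short list); excluded.
def Pre_leastMinutes (n : Int) : Prop := 1 ≤ n
instance (n : Int) : Decidable (Pre_leastMinutes n) := by unfold Pre_leastMinutes; infer_instance
def pvWitness_leastMinutes : Int := 7

def Spec_leastMinutes (n : Int) (out : Int) : Prop := out = leastMinutes_alt n
instance (n : Int) (out : Int) : Decidable (Spec_leastMinutes n out) := by unfold Spec_leastMinutes; infer_instance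

-- ===== CLAIM (what is proved, stated in full; the proofs are below) =====
def Claim_equal_leastMinutes : Prop := ∀ (n : Int), Dom_leastMinutes n → Pre_leastMinutes n → Spec_leastMinutes n (leastMinutes n)

-- ===== LEMMAS AND PROOFS =====

-- bitLength is monotone on nonnegative integers
theorem pv_bl_mono (a b : Int) (ha : 0 ≤ a) (hab : a ≤ b) :
    PySem.Int.bitLength a ≤ PySem.Int.bitLength b := by
  rcases eq_or_lt_of_le ha with h0 | h0
  · simp [← h0, PySem.Int.bitLength_zero]
  · by_contra h
    push Not at h
    have hb0 : b ≠ 0 := by omega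
    have h1 := PySem.Int.lt_two_pow_bitLength b
    have h2 := PySem.Int.two_pow_bitLength_le a (by omega)
    have h3 : 2 ^ PySem.Int.bitLength b ≤ 2 ^ (PySem.Int.bitLength a - 1) :=
      Nat.pow_le_pow_right (by omega) (by omega)
    have h4 : a.natAbs ≤ b.natAbs := by omega
    omega

-- the closed form satisfies the DP recurrence for i ≥ 5
theorem pv_rec (m : Int) (hm : 5 ≤ m) :
    min ((PySem.Int.bitLength (m - 1 - 1) : Int) + 1 + 1)
        ((PySem.Int.bitLength (PySem.Int.floordiv (m + 1) 2 - 1) : Int) + 1 + 1)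
      = (PySem.Int.bitLength (m - 1) : Int) + 1 := by
  have hq : PySem.Int.floordiv (m + 1) 2 - 1 = PySem.Int.floordiv (m - 1) 2 := by
    rw [PySem.Int.floordiv_eq_ediv_of_pos (by omega), PySem.Int.floordiv_eq_ediv_of_pos (by omega)]
    omega
  have hhalf : PySem.Int.bitLength (m - 1) = PySem.Int.bitLength (PySem.Int.floordiv (m - 1) 2) + 1 :=
    PySem.Int.bitLength_of_pos (by omega)
  rw [hq]
  have hle : PySem.Int.floordiv (m - 1) 2 ≤ m - 1 - 1 := by
    rw [PySem.Int.floordiv_eq_ediv_of_pos (by omega)]; omega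
  have hnn : (0:Int) ≤ PySem.Int.floordiv (m - 1) 2 := by
    rw [PySem.Int.floordiv_eq_ediv_of_pos (by omega)]; omega
  have hmono := pv_bl_mono (PySem.Int.floordiv (m - 1) 2) (m - 1 - 1) hnn hle
  omega

-- getD facts about lmInit
theorem pv_lmInit_eq (n : Int) :
    lmInit n = ((((List.replicate (n + 1).toNat 0).set 1 1).set 2 2).set 3 3).set 4 3 := by
  unfold lmInit
  rw [PySem.List.pySetD_of_nonneg _ _ (by norm_num), PySem.List.pySetD_of_nonneg _ _ (by norm_num),
    PySem.List.pySetD_of_nonneg _ _ (by norm_num), PySem.List.pySetD_of_nonneg _ _ (by norm_num)]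
  rfl

theorem pv_lmInit_length (n : Int) : (lmInit n).length = (n + 1).toNat := by
  simp [pv_lmInit_eq]

theorem pv_lmInit_getD (n : Int) (hn : 5 ≤ n) (j : Nat) (h1 : 1 ≤ j) (h4 : j ≤ 4) :
    (lmInit n).getD j 0 = (PySem.Int.bitLength ((j : Int) - 1) : Int) + 1 := by
  have hlen : (List.replicate (n + 1).toNat (0 : Int)).length = (n + 1).toNat := by simp
  rw [pv_lmInit_eq, List.getD_eq_getElem?_getD]
  interval_cases j
  · rw [List.getElem?_set_ne (by omega), List.getElem?_set_ne (by omega),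
      List.getElem?_set_ne (by omega), List.getElem?_set_self (by simp [hlen]; omega)]
    decide
  · rw [List.getElem?_set_ne (by omega), List.getElem?_set_ne (by omega),
      List.getElem?_set_self (by simp [hlen]; omega)]
    decide
  · rw [List.getElem?_set_ne (by omega), List.getElem?_set_self (by simp [hlen]; omega)]
    decide
  · rw [List.getElem?_set_self (by simp [hlen]; omega)]
    decide

-- loop invariant: folding the step over range(5, m) fills dp[j] with bitLength(j-1)+1 for 1 ≤ j < m
theorem pv_inv (n : Int) (hn : 5 ≤ n) (m : Int) (hm5 : 5 ≤ m) (hmn : m ≤ n + 1) :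
    ((PySem.List.pyRange 5 m 1).foldl lmStep (lmInit n)).length = (n + 1).toNat ∧
    ∀ j : Nat, 1 ≤ j → (j : Int) < m →
      ((PySem.List.pyRange 5 m 1).foldl lmStep (lmInit n)).getD j 0
        = (PySem.Int.bitLength ((j : Int) - 1) : Int) + 1 := by
  induction m, hm5 using Int.le_induction with
  | base =>
      rw [PySem.List.pyRange_one_eq_nil (by omega)]
      refine ⟨pv_lmInit_length n, ?_⟩
      intro j h1 hj
      exact pv_lmInit_getD n hn j h1 (by omega)
  | succ m hm ih =>
      have ihm := ih (by omega)
      obtain ⟨ihlen, ihget⟩ := ihm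
      rw [PySem.List.pyRange_one_succ_right (by omega : (5:Int) ≤ m), List.foldl_append]
      set dp := (PySem.List.pyRange 5 m 1).foldl lmStep (lmInit n) with hdp
      simp only [List.foldl_cons, List.foldl_nil]
      -- values read by the step
      have hq2 : PySem.Int.floordiv (m + 1) 2 = ((((m + 1) / 2).toNat : Nat) : Int) := by
        rw [PySem.Int.floordiv_eq_ediv_of_pos (by omega)]; omega
      have hga : PySem.List.pyGetD dp (m - 1) 0 = dp.getD (m - 1).toNat 0 :=
        PySem.List.pyGetD_of_nonneg _ _ (by omega)
      have hgb : PySem.List.pyGetD dp (PySem.Int.floordiv (m + 1) 2) 0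
          = dp.getD ((m + 1) / 2).toNat 0 := by
        rw [PySem.List.pyGetD_of_nonneg _ _ ?_] <;> rw [PySem.Int.floordiv_eq_ediv_of_pos (by omega)]
        omega
      have hva : dp.getD (m - 1).toNat 0 = (PySem.Int.bitLength (m - 1 - 1) : Int) + 1 := by
        have h := ihget (m - 1).toNat (by omega) (by omega)
        rwa [(by omega : (((m - 1).toNat : Nat) : Int) - 1 = m - 1 - 1)] at h
      have hvb : dp.getD ((m + 1) / 2).toNat 0
          = (PySem.Int.bitLength (PySem.Int.floordiv (m + 1) 2 - 1) : Int) + 1 := by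
        have h := ihget ((m + 1) / 2).toNat (by omega) (by omega)
        have e : ((((m + 1) / 2).toNat : Nat) : Int) - 1 = PySem.Int.floordiv (m + 1) 2 - 1 := by
          rw [PySem.Int.floordiv_eq_ediv_of_pos (by omega)]; omega
        rwa [e] at h
      have hstep : lmStep dp m = dp.set m.toNat ((PySem.Int.bitLength (m - 1) : Int) + 1) := by
        unfold lmStep
        rw [hga, hgb, hva, hvb, pv_rec m (by omega),
          PySem.List.pySetD_of_nonneg _ _ (by omega)]
      rw [hstep]
      constructor
      · simp [ihlen]
      · intro j h1 hj
        rw [List.getD_eq_getElem?_getD, List.getElem?_set]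
        by_cases hje : j = m.toNat
        · rw [if_pos (by omega)]
          simp only [ihlen]
          rw [if_pos (by omega)]
          simp only [Option.getD_some]
          rw [(by omega : ((j : Nat) : Int) - 1 = m - 1)]
        · rw [if_neg (by omega), ← List.getD_eq_getElem?_getD]
          exact ihget j h1 (by omega)

-- ===== VERDICT (by name: the statement is the Claim_ definition above) =====
theorem leastMinutes_spec : Claim_equal_leastMinutes := by
  intro n _hdom hpre
  unfold Spec_leastMinutes leastMinutes leastMinutes_alt
  have h1 : (1:Int) ≤ n := hpre
  by_cases e1 : n = 1
  · subst e1; decide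
  by_cases e2 : n = 2
  · subst e2; decide
  by_cases e3 : n = 3
  · subst e3; decide
  by_cases e4 : n = 4
  · subst e4; decide
  have hn5 : 5 ≤ n := by omega
  rw [if_neg e1, if_neg e2, if_neg e3, if_neg e4]
  obtain ⟨_, hget⟩ := pv_inv n hn5 (n + 1) (by omega) le_rfl
  have h := hget n.toNat (by omega) (by omega)
  rw [PySem.List.pyGetD_of_nonneg _ _ (by omega), h]
  have : ((n.toNat : Nat) : Int) = n := by omega
  rw [this]
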